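-- pv_equiv track=rewrite | github.com/snehakumbhare/python-A | dataType157.py | interleave_diff_len_lists
-- ===== SOURCE A (Python) =====
-- def interleave_diff_len_lists(list1, list2, list3, list4):
--     # Create an empty list called 'result' to store the interleaved elements.
--     result = []
--
--     # Get the lengths of the input lists and store them in 'l1', 'l2', 'l3', and 'l4'.
--     l1 = len(list1)
--     l2 = len(list2)
--     l3 = len(list3)
--     l4 = len(list4)
--
--     # Iterate from 0 to the maximum length among the input lists using 'max' function.
--     for i in range(max(l1, l2, l3, l4)):
--         # Check if 'i' is less than 'l1' and add the element from 'list1' to 'result'.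
--         if i < l1:
--             result.append(list1[i])
--         # Check if 'i' is less than 'l2' and add the element from 'list2' to 'result'.
--         if i < l2:
--             result.append(list2[i])
--         # Check if 'i' is less than 'l3' and add the element from 'list3' to 'result'.
--         if i < l3:
--             result.append(list3[i])
--         # Check if 'i' is less than 'l4' and add the element from 'list4' to 'result'.
--         if i < l4:
--             result.append(list4[i])
--
--     # Return the 'result' list containing interleaved elements from the input lists.
--     return result
-- ===== SOURCE B (Python) =====
-- def interleave_diff_len_lists(list1, list2, list3, list4):
--     # Round-robin merge over a shrinking pool of iterators: each round takes
--     # one element from every still-live iterator, in order; an exhausted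
--     # iterator leaves the pool, so no per-index bound checks are needed.
--     result = []
--     active = [iter(list1), iter(list2), iter(list3), iter(list4)]
--     while active:
--         still_alive = []
--         for it in active:
--             try:
--                 result.append(next(it))
--             except StopIteration:
--                 continue
--             still_alive.append(it)
--         active = still_alive
--     return result
-- ===== Notes on version B (the rewrite author's own statement) =====
-- stated objective: alternative
-- what changed: Replaces the max-length indexed loop with four per-index bound checks by a round-robin merge over a shrinking pool of iterators (suffixes), where exhausted iterators drop out of the pool instead of being guarded.
import Mathlib
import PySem

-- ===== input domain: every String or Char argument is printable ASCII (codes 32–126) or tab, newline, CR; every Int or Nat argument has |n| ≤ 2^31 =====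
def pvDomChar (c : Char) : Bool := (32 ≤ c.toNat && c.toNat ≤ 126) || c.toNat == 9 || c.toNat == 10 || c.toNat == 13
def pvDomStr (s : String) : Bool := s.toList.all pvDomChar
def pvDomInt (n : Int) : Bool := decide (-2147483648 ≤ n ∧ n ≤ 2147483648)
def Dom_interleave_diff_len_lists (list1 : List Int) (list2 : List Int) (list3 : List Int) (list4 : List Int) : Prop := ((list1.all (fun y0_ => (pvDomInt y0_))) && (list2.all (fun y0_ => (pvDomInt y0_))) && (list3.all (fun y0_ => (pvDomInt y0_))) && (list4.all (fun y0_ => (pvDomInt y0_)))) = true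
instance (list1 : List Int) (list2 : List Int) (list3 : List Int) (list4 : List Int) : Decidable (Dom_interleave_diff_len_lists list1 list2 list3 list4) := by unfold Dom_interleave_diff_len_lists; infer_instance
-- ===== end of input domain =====

-- B replaces A's max-length indexed loop (four per-index bound checks) by a round-robin
-- merge over a shrinking pool of iterators (alternative decomposition, same cost).

-- ===== PORT A =====
def interleave_diff_len_lists (list1 : List Int) (list2 : List Int) (list3 : List Int) (list4 : List Int) : List Int :=
  let l1 : Int := list1.length
  let l2 : Int := list2.length
  let l3 : Int := list3.length
  let l4 : Int := list4.length
  (PySem.List.pyRange 0 (max (max (max l1 l2) l3) l4) 1).foldl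
    (fun result i =>
      let result := if i < l1 then result ++ [PySem.List.pyGetD list1 i 0] else result
      let result := if i < l2 then result ++ [PySem.List.pyGetD list2 i 0] else result
      let result := if i < l3 then result ++ [PySem.List.pyGetD list3 i 0] else result
      if i < l4 then result ++ [PySem.List.pyGetD list4 i 0] else result)
    []

-- ===== PORT B =====
-- an iterator over a Python list is modelled by the suffix it has yet to yield;
-- pvAltRound is one round of B's inner for-loop: next() each live iterator into
-- result (an exhausted one is skipped), keep the survivors in order
def pvAltRound (active : List (List Int)) (result : List Int) : List Int × List (List Int) :=
  active.foldl
    (fun (st : List Int × List (List Int)) it =>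
      match it with
      | [] => st
      | x :: rest => (st.1 ++ [x], st.2 ++ [rest]))
    (result, [])
theorem pvAltRound_go (active : List (List Int)) (a : List Int) (b : List (List Int)) :
    active.foldl
      (fun (st : List Int × List (List Int)) it =>
        match it with
        | [] => st
        | x :: rest => (st.1 ++ [x], st.2 ++ [rest]))
      (a, b)
    = (a ++ active.filterMap List.head?,
       b ++ (active.filter (fun l => !l.isEmpty)).map List.tail) := by
  induction active generalizing a b with
  | nil => simp
  | cons h t ih =>
    cases h with
    | nil => simp [List.foldl_cons, ih]
    | cons x rest => simp [List.foldl_cons, ih]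
theorem pvRound_measure (active : List (List Int)) :
    ((((active.filter (fun l => !l.isEmpty)).map List.tail).map List.length).sum
      + ((active.filter (fun l => !l.isEmpty)).map List.tail).length)
    = (active.map List.length).sum := by
  induction active with
  | nil => simp
  | cons h t ih =>
    cases h with
    | nil => simpa using ih
    | cons x rest =>
      simp only [List.filter_cons, List.isEmpty_cons, Bool.not_false, if_true, List.map_cons,
        List.sum_cons, List.length_cons, List.tail_cons] at *
      omega
def pvAltLoop (active : List (List Int)) (result : List Int) : List Int :=
  if h : active = [] then result
  else
    pvAltLoop (pvAltRound active result).2 (pvAltRound active result).1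
termination_by (active.map List.length).sum + active.length
decreasing_by
  have hm := pvRound_measure active
  have hlen : 1 ≤ active.length := by
    cases active with
    | nil => exact absurd rfl h
    | cons a t => simp
  simp only [pvAltRound, pvAltRound_go, List.nil_append]
  omega

def interleave_diff_len_lists_alt (list1 : List Int) (list2 : List Int) (list3 : List Int) (list4 : List Int) : List Int :=
  pvAltLoop [list1, list2, list3, list4] []

-- ===== PRECONDITION & SPEC =====
def Spec_interleave_diff_len_lists (list1 : List Int) (list2 : List Int) (list3 : List Int) (list4 : List Int) (out : List Int) : Prop := out = interleave_diff_len_lists_alt list1 list2 list3 list4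
instance (list1 : List Int) (list2 : List Int) (list3 : List Int) (list4 : List Int) (out : List Int) : Decidable (Spec_interleave_diff_len_lists list1 list2 list3 list4 out) := by unfold Spec_interleave_diff_len_lists; infer_instance

-- ===== CLAIM (what is proved, stated in full; the proofs are below) =====
def Claim_equal_interleave_diff_len_lists : Prop := ∀ (list1 : List Int) (list2 : List Int) (list3 : List Int) (list4 : List Int), Dom_interleave_diff_len_lists list1 list2 list3 list4 → Spec_interleave_diff_len_lists list1 list2 list3 list4 (interleave_diff_len_lists list1 list2 list3 list4)

-- ===== LEMMAS AND PROOFS =====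
-- pvItl is the reference function: round-robin interleaving of a pool of lists
def pvItl (active : List (List Int)) : List Int :=
  if (active.filter (fun l => !l.isEmpty)) = [] then []
  else (active.filterMap List.head?)
       ++ pvItl ((active.filter (fun l => !l.isEmpty)).map List.tail)
termination_by (active.map List.length).sum
decreasing_by
  rename_i h
  have e1 : (List.filter (fun x => !(Subtype.val x).isEmpty) active.attach).unattach
      = List.filter (fun l => !l.isEmpty) active := by
    rw [List.unattach_filter (g := fun l => !l.isEmpty) (hf := fun x hx => rfl),
      List.unattach_attach]
  have hne : List.filter (fun l => !l.isEmpty) active ≠ [] := by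
    intro hc
    apply h
    rw [show (fun (x : {x // x ∈ active}) => match x with | ⟨l, _⟩ => !l.isEmpty)
        = (fun (x : {x // x ∈ active}) => !(Subtype.val x).isEmpty) from rfl, e1, hc]
  have e2 : List.map (fun (x : {x // x ∈ active}) => (Subtype.val x).tail)
        (List.filter (fun x => !(Subtype.val x).isEmpty) active.attach)
      = List.map List.tail (List.filter (fun l => !l.isEmpty) active) := by
    conv_rhs => rw [← e1]
    simp only [List.unattach, List.map_map]
    rfl
  rw [e2]
  have hm := pvRound_measure active
  have h1 : 1 ≤ (List.filter (fun l => !l.isEmpty) active).length := by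
    cases hf : List.filter (fun l => !l.isEmpty) active with
    | nil => exact absurd hf hne
    | cons a t => simp
  simp only [List.length_map] at hm
  omega
theorem filterMap_head?_filter (xs : List (List Int)) :
    (xs.filter (fun l => !l.isEmpty)).filterMap List.head? = xs.filterMap List.head? := by
  induction xs with
  | nil => rfl
  | cons h t ih => cases h <;> simp [List.filter_cons, ih]

theorem filter_map_tail_filter (xs : List (List Int)) :
    ((xs.filter (fun l => !l.isEmpty)).map List.tail).filter (fun l => !l.isEmpty)
      = (xs.map List.tail).filter (fun l => !l.isEmpty) := by
  induction xs with
  | nil => rfl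
  | cons h t ih => cases h <;> simp [List.filter_cons, ih]

theorem pvItl_filter (xs : List (List Int)) :
    pvItl (xs.filter (fun l => !l.isEmpty)) = pvItl xs := by
  conv_lhs => rw [pvItl.eq_def]
  conv_rhs => rw [pvItl.eq_def]
  simp only [List.filter_filter, Bool.and_self, filterMap_head?_filter]

theorem pvItl_step (xs : List (List Int)) (h : xs.filter (fun l => !l.isEmpty) ≠ []) :
    pvItl xs = xs.filterMap List.head? ++ pvItl (xs.map List.tail) := by
  rw [pvItl.eq_def]
  simp only [h, if_false]
  congr 1
  calc pvItl ((xs.filter (fun l => !l.isEmpty)).map List.tail)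
      = pvItl (((xs.filter (fun l => !l.isEmpty)).map List.tail).filter (fun l => !l.isEmpty)) :=
        (pvItl_filter _).symm
    _ = pvItl ((xs.map List.tail).filter (fun l => !l.isEmpty)) := by rw [filter_map_tail_filter]
    _ = pvItl (xs.map List.tail) := pvItl_filter _

theorem pvItl_all_empty (xs : List (List Int)) (h : xs.filter (fun l => !l.isEmpty) = []) :
    pvItl xs = [] := by
  rw [pvItl.eq_def]; simp [h]
theorem pvAltLoop_eq (active : List (List Int)) (result : List Int) :
    pvAltLoop active result = result ++ pvItl active := by
  induction active, result using pvAltLoop.induct with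
  | case1 result =>
    rw [pvAltLoop]
    simp [pvItl_all_empty [] rfl]
  | case2 active result h ih =>
    rw [pvAltLoop]
    simp only [h, dite_false]
    rw [ih]
    have hr2 : (pvAltRound active result).2
        = (active.filter (fun l => !l.isEmpty)).map List.tail := by
      simp [pvAltRound, pvAltRound_go]
    have hr1 : (pvAltRound active result).1 = result ++ active.filterMap List.head? := by
      simp [pvAltRound, pvAltRound_go]
    rw [hr1, hr2]
    by_cases hf : active.filter (fun l => !l.isEmpty) = []
    · have h1 : active.filterMap List.head? = [] := by
        rw [← filterMap_head?_filter, hf]; rfl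
      rw [pvItl_all_empty active hf, hf]
      simp [h1, pvItl_all_empty [] rfl]
    · conv_rhs => rw [pvItl.eq_def]
      simp only [hf, if_false, List.append_assoc]
theorem pvStepFact (l : List Int) (k : Nat) (r : List Int) :
    (if (k : Int) < (l.length : Int) then r ++ [PySem.List.pyGetD l (k : Int) 0] else r)
      = r ++ (l[k]?).toList := by
  by_cases c : k < l.length
  · simp [c, PySem.List.pyGetD_natCast, List.getD_eq_getElem?_getD]
  · simp [c]

theorem pvFilterMapHead (a b c d : List Int) :
    ([a, b, c, d].filterMap List.head?)
      = a.head?.toList ++ b.head?.toList ++ c.head?.toList ++ d.head?.toList := by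
  cases a <;> cases b <;> cases c <;> cases d <;> simp

theorem pvA_loop (l1 l2 l3 l4 : List Int) (fuel : Nat) : ∀ (k : Nat) (acc : List Int),
    max (max (max l1.length l2.length) l3.length) l4.length ≤ k + fuel →
    (PySem.List.pyRange (k : Int)
        (max (max (max (l1.length : Int) l2.length) l3.length) l4.length) 1).foldl
      (fun result i =>
        let result := if i < (l1.length : Int) then result ++ [PySem.List.pyGetD l1 i 0] else result
        let result := if i < (l2.length : Int) then result ++ [PySem.List.pyGetD l2 i 0] else result
        let result := if i < (l3.length : Int) then result ++ [PySem.List.pyGetD l3 i 0] else result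
        if i < (l4.length : Int) then result ++ [PySem.List.pyGetD l4 i 0] else result)
      acc
    = acc ++ pvItl [l1.drop k, l2.drop k, l3.drop k, l4.drop k] := by
  have hM : (max (max (max (l1.length : Int) l2.length) l3.length) l4.length)
      = ((max (max (max l1.length l2.length) l3.length) l4.length : Nat) : Int) := by
    push_cast; ring_nf
  induction fuel with
  | zero =>
    intro k acc hk
    rw [hM, PySem.List.pyRange_one_eq_nil (by exact_mod_cast hk)]
    have d1 : l1.drop k = [] := List.drop_eq_nil_iff.2 (by omega)
    have d2 : l2.drop k = [] := List.drop_eq_nil_iff.2 (by omega)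
    have d3 : l3.drop k = [] := List.drop_eq_nil_iff.2 (by omega)
    have d4 : l4.drop k = [] := List.drop_eq_nil_iff.2 (by omega)
    rw [d1, d2, d3, d4, pvItl_all_empty _ rfl]
    simp
  | succ fuel ih =>
    intro k acc hk
    by_cases hlt : k < max (max (max l1.length l2.length) l3.length) l4.length
    · rw [hM, PySem.List.pyRange_one_cons (by exact_mod_cast hlt), List.foldl_cons]
      have hcast : ((k : Int) + 1) = (((k + 1 : Nat)) : Int) := by push_cast; ring
      rw [hcast, ← hM, ih (k + 1) _ (by omega)]
      -- now reduce the step and one pvItl unfolding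
      have hstep : pvItl [l1.drop k, l2.drop k, l3.drop k, l4.drop k]
          = ([l1.drop k, l2.drop k, l3.drop k, l4.drop k].filterMap List.head?)
            ++ pvItl [l1.drop (k+1), l2.drop (k+1), l3.drop (k+1), l4.drop (k+1)] := by
        rw [pvItl_step]
        · simp [List.tail_drop]
        · intro hc
          rw [List.filter_eq_nil_iff] at hc
          have hor : k < l1.length ∨ k < l2.length ∨ k < l3.length ∨ k < l4.length := by omega
          rcases hor with h|h|h|h
          · have := hc (l1.drop k) (by simp)
            simp [List.drop_eq_nil_iff] at this; omega
          · have := hc (l2.drop k) (by simp)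
            simp [List.drop_eq_nil_iff] at this; omega
          · have := hc (l3.drop k) (by simp)
            simp [List.drop_eq_nil_iff] at this; omega
          · have := hc (l4.drop k) (by simp)
            simp [List.drop_eq_nil_iff] at this; omega
      rw [hstep, pvFilterMapHead]
      simp only [List.head?_drop]
      simp only [pvStepFact]
      simp [List.append_assoc]
    · rw [hM, PySem.List.pyRange_one_eq_nil (by exact_mod_cast (by omega : max (max (max l1.length l2.length) l3.length) l4.length ≤ k))]
      have d1 : l1.drop k = [] := List.drop_eq_nil_iff.2 (by omega)
      have d2 : l2.drop k = [] := List.drop_eq_nil_iff.2 (by omega)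
      have d3 : l3.drop k = [] := List.drop_eq_nil_iff.2 (by omega)
      have d4 : l4.drop k = [] := List.drop_eq_nil_iff.2 (by omega)
      rw [d1, d2, d3, d4, pvItl_all_empty _ rfl]
      simp

-- ===== VERDICT (by name: the statement is the Claim_ definition above) =====
theorem interleave_diff_len_lists_spec : Claim_equal_interleave_diff_len_lists := by
  intro l1 l2 l3 l4 _
  unfold Spec_interleave_diff_len_lists interleave_diff_len_lists interleave_diff_len_lists_alt
  rw [pvAltLoop_eq]
  have h := pvA_loop l1 l2 l3 l4
    (max (max (max l1.length l2.length) l3.length) l4.length) 0 [] (by omega)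
  simpa using h
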